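-- pv_equiv track=rewrite | github.com/jonathandeamer/notable-person-finder | scripts/det_mw_candidates.py | biography_score
-- ===== SOURCE A (Python) =====
-- def _normalize_category(cat: str) -> str:
--     if not cat:
--         return ""
--     cat = cat.strip()
--     if cat.lower().startswith("category:"):
--         cat = cat.split(":", 1)[1]
--     return cat.lower().strip()
--
-- def biography_score(categories: list[str]) -> int:
--     score = 0
--     norm = [_normalize_category(c) for c in categories]
--     norm = [c for c in norm if c]
--
--     # Strong positives
--     if any(c.endswith(" births") for c in norm):
--         score += 3
--     if any(c.endswith(" deaths") for c in norm):
--         score += 3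
--     if any(c == "living people" for c in norm):
--         score += 3
--
--     # People/occupation positives
--     if any(" people" in c for c in norm):
--         score += 2
--
--     occupation_keywords = (
--         "actors",
--         "actresses",
--         "singers",
--         "musicians",
--         "composers",
--         "writers",
--         "poets",
--         "journalists",
--         "politicians",
--         "scientists",
--         "engineers",
--         "artists",
--         "painters",
--         "designers",
--         "directors",
--         "producers",
--         "athletes",
--         "sportspeople",
--         "footballers",
--         "players",
--         "coaches",
--         "lawyers",
--         "judges",
--         "professors",
--         "historians",
--         "photographers",
--         "dancers",
--     )
--     if any(any(c.endswith(k) for k in occupation_keywords) for c in norm):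
--         score += 1
--
--     # Strong negatives
--     negative_tokens = (
--         "lists",
--         "events",
--         "awards",
--         "templates",
--         "disambiguation",
--         "articles",
--         "redirects",
--         "organizations",
--         "companies",
--         "municipalities",
--         "geographic",
--         "schools",
--         "universities",
--         "clubs",
--     )
--     if any(any(tok in c for tok in negative_tokens) for c in norm):
--         score -= 3
--
--     return score
-- ===== SOURCE B (Python) =====
-- OCCUPATION_KEYWORDS = (
--     "actors", "actresses", "singers", "musicians", "composers", "writers",
--     "poets", "journalists", "politicians", "scientists", "engineers",
--     "artists", "painters", "designers", "directors", "producers", "athletes",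
--     "sportspeople", "footballers", "players", "coaches", "lawyers", "judges",
--     "professors", "historians", "photographers", "dancers",
-- )
--
-- NEGATIVE_TOKENS = (
--     "lists", "events", "awards", "templates", "disambiguation", "articles",
--     "redirects", "organizations", "companies", "municipalities", "geographic",
--     "schools", "universities", "clubs",
-- )
--
-- def _normalize_category(cat: str) -> str:
--     if not cat:
--         return ""
--     cat = cat.strip()
--     if cat.lower().startswith("category:"):
--         cat = cat.split(":", 1)[1]
--     return cat.lower().strip()
--
-- def biography_score(categories: list[str]) -> int:
--     # One pass: normalize each category and OR six boolean flags as we go.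
--     births = deaths = living = people = occ = neg = False
--     for raw in categories:
--         c = _normalize_category(raw)
--         if not c:
--             continue
--         births = births or c.endswith(" births")
--         deaths = deaths or c.endswith(" deaths")
--         living = living or c == "living people"
--         people = people or (" people" in c)
--         occ = occ or c.endswith(OCCUPATION_KEYWORDS)
--         neg = neg or any(tok in c for tok in NEGATIVE_TOKENS)
--     return 3 * births + 3 * deaths + 3 * living + 2 * people + 1 * occ - 3 * neg
-- ===== Notes on version B (the rewrite author's own statement) =====
-- stated objective: faster
-- what changed: B replaces A's six separate any() scans over the normalized category list by a single loop over the categories that normalizes each once and accumulates six boolean flags (short-circuiting each flag once set), combining them arithmetically at the end.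
import Mathlib
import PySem

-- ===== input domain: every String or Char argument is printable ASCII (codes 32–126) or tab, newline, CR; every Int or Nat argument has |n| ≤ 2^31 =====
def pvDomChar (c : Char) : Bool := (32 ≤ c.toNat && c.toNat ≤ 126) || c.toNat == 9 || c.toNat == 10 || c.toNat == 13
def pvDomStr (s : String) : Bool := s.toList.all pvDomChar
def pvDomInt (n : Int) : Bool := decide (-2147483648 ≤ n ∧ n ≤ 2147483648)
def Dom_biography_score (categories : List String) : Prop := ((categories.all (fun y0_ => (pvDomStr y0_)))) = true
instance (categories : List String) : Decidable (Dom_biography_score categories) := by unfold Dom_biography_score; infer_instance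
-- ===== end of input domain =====

-- B replaces A's six separate any() scans over the normalized list by a single pass
-- over the categories that accumulates six boolean flags (objective: alternative decomposition).

-- ===== PORT A =====
-- _normalize_category; the [1] after split(":", 1) is ported as pyGet? 1 with default "",
-- which is exact: under the startswith "category:" guard the split always has a second piece.
def pvNormalizeCategory (cat : String) : String :=
  if PySem.Str.len cat == 0 then ""
  else
    let cat := PySem.Str.strip cat
    let cat :=
      if PySem.Str.startswith (PySem.Str.lower cat) "category:" then
        (PySem.List.pyGet? ((PySem.Str.splitMax? cat ":" 1).getD []) 1).getD ""
      else cat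
    PySem.Str.strip (PySem.Str.lower cat)

def pvOccupationKeywords : List String :=
  ["actors", "actresses", "singers", "musicians", "composers", "writers",
   "poets", "journalists", "politicians", "scientists", "engineers",
   "artists", "painters", "designers", "directors", "producers", "athletes",
   "sportspeople", "footballers", "players", "coaches", "lawyers", "judges",
   "professors", "historians", "photographers", "dancers"]

def pvNegativeTokens : List String :=
  ["lists", "events", "awards", "templates", "disambiguation", "articles",
   "redirects", "organizations", "companies", "municipalities", "geographic",
   "schools", "universities", "clubs"]

def biography_score (categories : List String) : Int :=
  let score : Int := 0
  let norm := categories.map pvNormalizeCategory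
  let norm := norm.filter (fun c => !(PySem.Str.len c == 0))
  let score := if norm.any (fun c => PySem.Str.endswith c " births") then score + 3 else score
  let score := if norm.any (fun c => PySem.Str.endswith c " deaths") then score + 3 else score
  let score := if norm.any (fun c => c == "living people") then score + 3 else score
  let score := if norm.any (fun c => PySem.Str.isIn " people" c) then score + 2 else score
  let score := if norm.any (fun c => pvOccupationKeywords.any (fun k => PySem.Str.endswith c k)) then score + 1 else score
  let score := if norm.any (fun c => pvNegativeTokens.any (fun tok => PySem.Str.isIn tok c)) then score - 3 else score
  score

-- ===== PORT B =====
def pvStep (st : Bool × Bool × Bool × Bool × Bool × Bool) (raw : String) :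
    Bool × Bool × Bool × Bool × Bool × Bool :=
  let c := pvNormalizeCategory raw
  if PySem.Str.len c == 0 then st
  else
    (st.1 || PySem.Str.endswith c " births",
     st.2.1 || PySem.Str.endswith c " deaths",
     st.2.2.1 || (c == "living people"),
     st.2.2.2.1 || PySem.Str.isIn " people" c,
     st.2.2.2.2.1 || pvOccupationKeywords.any (fun k => PySem.Str.endswith c k),
     st.2.2.2.2.2 || pvNegativeTokens.any (fun tok => PySem.Str.isIn tok c))

def biography_score_alt (categories : List String) : Int :=
  let st := categories.foldl pvStep (false, false, false, false, false, false)
  3 * (if st.1 then (1 : Int) else 0) + 3 * (if st.2.1 then (1 : Int) else 0) +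
  3 * (if st.2.2.1 then (1 : Int) else 0) + 2 * (if st.2.2.2.1 then (1 : Int) else 0) +
  1 * (if st.2.2.2.2.1 then (1 : Int) else 0) - 3 * (if st.2.2.2.2.2 then (1 : Int) else 0)

-- ===== PRECONDITION & SPEC =====
def Spec_biography_score (categories : List String) (out : Int) : Prop := out = biography_score_alt categories
instance (categories : List String) (out : Int) : Decidable (Spec_biography_score categories out) := by unfold Spec_biography_score; infer_instance

-- ===== CLAIM (what is proved, stated in full; the proofs are below) =====
def Claim_equal_biography_score : Prop := ∀ (categories : List String), Dom_biography_score categories → Spec_biography_score categories (biography_score categories)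

-- ===== LEMMAS AND PROOFS =====
theorem pvStep_foldl (cats : List String) (b1 b2 b3 b4 b5 b6 : Bool) :
    cats.foldl pvStep (b1, b2, b3, b4, b5, b6) =
      (let norm := (cats.map pvNormalizeCategory).filter (fun c => !(PySem.Str.len c == 0))
       (b1 || norm.any (fun c => PySem.Str.endswith c " births"),
        b2 || norm.any (fun c => PySem.Str.endswith c " deaths"),
        b3 || norm.any (fun c => c == "living people"),
        b4 || norm.any (fun c => PySem.Str.isIn " people" c),
        b5 || norm.any (fun c => pvOccupationKeywords.any (fun k => PySem.Str.endswith c k)),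
        b6 || norm.any (fun c => pvNegativeTokens.any (fun tok => PySem.Str.isIn tok c)))) := by
  induction cats generalizing b1 b2 b3 b4 b5 b6 with
  | nil => simp
  | cons c cs ih =>
    rw [List.foldl_cons]
    by_cases h : pvNormalizeCategory c = ""
    · have hs : pvStep (b1, b2, b3, b4, b5, b6) c = (b1, b2, b3, b4, b5, b6) := by
        simp [pvStep, h]
      rw [hs, ih]
      simp [List.filter_cons, h]
    · have hs : pvStep (b1, b2, b3, b4, b5, b6) c =
          (b1 || PySem.Str.endswith (pvNormalizeCategory c) " births",
           b2 || PySem.Str.endswith (pvNormalizeCategory c) " deaths",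
           b3 || (pvNormalizeCategory c == "living people"),
           b4 || PySem.Str.isIn " people" (pvNormalizeCategory c),
           b5 || pvOccupationKeywords.any (fun k => PySem.Str.endswith (pvNormalizeCategory c) k),
           b6 || pvNegativeTokens.any (fun tok => PySem.Str.isIn tok (pvNormalizeCategory c))) := by
        simp [pvStep, h]
      rw [hs, ih]
      simp [List.filter_cons, h, List.any_cons, Bool.or_assoc]

theorem biography_score_spec : Claim_equal_biography_score := by
  intro categories _
  unfold Spec_biography_score biography_score biography_score_alt
  rw [pvStep_foldl]
  simp only [Bool.false_or]
  set n := (categories.map pvNormalizeCategory).filter (fun c => !(PySem.Str.len c == 0)) with hn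
  cases n.any (fun c => PySem.Str.endswith c " births") <;>
    cases n.any (fun c => PySem.Str.endswith c " deaths") <;>
    cases n.any (fun c => c == "living people") <;>
    cases n.any (fun c => PySem.Str.isIn " people" c) <;>
    cases n.any (fun c => pvOccupationKeywords.any (fun k => PySem.Str.endswith c k)) <;>
    cases n.any (fun c => pvNegativeTokens.any (fun tok => PySem.Str.isIn tok c)) <;>
    norm_num
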